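-- pv_equiv track=rewrite | github.com/dumberr/LFA_Assignment3 | assignment 3.py | derivare
-- ===== SOURCE A (Python) =====
-- def derivare(cfg_generare, target, start="S", max_pasi=50):
--     def pasi(current_list, pas, nr_pasi):
--         if nr_pasi > max_pasi:
--             return None
--
--         if current_list == list(target):
--             return pas
--
--         if all(simbol not in cfg_generare for simbol in current_list):
--             return None
--
--         # caut primul neterminal
--         for i, simbol in enumerate(current_list):
--             if simbol in cfg_generare:
--                 for constr in cfg_generare[simbol]:
--                     if constr == []:
--                         new_list = current_list[:i] + current_list[i+1:]
--                     else:
--                         new_list = current_list[:i] + constr + current_list[i+1:]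
--                     result = pasi(new_list, pas + ["".join(new_list)], nr_pasi + 1)
--                     if result:
--                         return result
--                 break
--         return None
--
--     return pasi([start], [start], 0)
-- ===== SOURCE B (Python) =====
-- def derivare(cfg_generare, target, start="S", max_pasi=50):
--     tgt = list(target)
--     stack = [([start], [start], 0)]
--     while stack:
--         current, pas, nr = stack.pop()
--         if nr > max_pasi:
--             continue
--         if current == tgt:
--             return pas
--         # locate the first nonterminal (single scan, no separate all() pre-pass)
--         idx = None
--         for i, s in enumerate(current):
--             if s in cfg_generare:
--                 idx = i
--                 break
--         if idx is None:
--             continue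
--         head, tail = current[:idx], current[idx + 1:]
--         # push in reverse so the first production is explored first
--         for constr in reversed(cfg_generare[current[idx]]):
--             new_list = head + constr + tail
--             stack.append((new_list, pas + ["".join(new_list)], nr + 1))
--     return None
-- ===== Notes on version B (the rewrite author's own statement) =====
-- stated objective: alternative
-- what changed: Replaces A's recursive leftmost-DFS (nested pasi calls with an all()-pre-scan and truthiness backtracking) by an iterative DFS over an explicit stack of (sentential-form, path, step-count) frames, pushing each nonterminal's productions in reverse so the same first derivation path is found.
import Mathlib
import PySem

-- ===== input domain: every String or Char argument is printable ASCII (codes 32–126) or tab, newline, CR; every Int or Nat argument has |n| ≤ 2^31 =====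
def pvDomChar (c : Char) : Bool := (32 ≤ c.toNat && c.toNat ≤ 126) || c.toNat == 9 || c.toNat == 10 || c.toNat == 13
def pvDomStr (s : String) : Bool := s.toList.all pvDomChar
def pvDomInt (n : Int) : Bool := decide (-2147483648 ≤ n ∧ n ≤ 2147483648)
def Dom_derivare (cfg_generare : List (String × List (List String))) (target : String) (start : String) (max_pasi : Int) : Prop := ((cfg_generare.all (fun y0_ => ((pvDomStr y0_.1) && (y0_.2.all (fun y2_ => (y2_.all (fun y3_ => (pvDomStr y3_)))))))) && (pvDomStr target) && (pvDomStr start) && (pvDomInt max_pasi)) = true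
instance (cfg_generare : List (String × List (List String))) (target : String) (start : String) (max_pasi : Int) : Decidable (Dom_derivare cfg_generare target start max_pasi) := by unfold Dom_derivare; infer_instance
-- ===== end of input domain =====

-- B replaces A's recursive leftmost DFS by an iterative explicit-stack DFS (children pushed in
-- reverse production order) and drops A's separate all()-pre-scan; same results, objective: alternative.

-- shared input decoding / first-nonterminal scan (both Pythons scan for the first symbol that is a dict key)
def pvTgt (target : String) : List String := target.toList.map (fun c => String.ofList [c])

def pvFindNT (d : PySem.Dict String (List (List String))) : List String → Nat → Option (Nat × String)
  | [], _ => none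
  | s :: rest, i => if d.contains s then some (i, s) else pvFindNT d rest (i + 1)

-- ===== PORT A =====
mutual
def pasiA (d : PySem.Dict String (List (List String))) (tgt : List String) (mp : Int)
    (cl pas : List String) (nr : Int) : Option (List String) :=
  if h : mp < nr then none
  else if cl = tgt then some pas
  else if cl.all (fun s => !(d.contains s)) then none
  else
    match pvFindNT d cl 0 with
    | none => none
    | some (i, s) => tryA d tgt mp (d.getD s []) cl pas nr i (not_lt.mp h)
termination_by ((mp + 1 - nr).toNat, 1, 0)

def tryA (d : PySem.Dict String (List (List String))) (tgt : List String) (mp : Int)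
    (prods : List (List String)) (cl pas : List String) (nr : Int) (i : Nat) (h : nr ≤ mp) :
    Option (List String) :=
  match prods with
  | [] => none
  | constr :: rest =>
    let new_list := if constr = [] then cl.take i ++ cl.drop (i + 1)
                    else cl.take i ++ constr ++ cl.drop (i + 1)
    match pasiA d tgt mp new_list (pas ++ [PySem.Str.join "" new_list]) (nr + 1) with
    | some r => if r = [] then tryA d tgt mp rest cl pas nr i h else some r
    | none => tryA d tgt mp rest cl pas nr i h
termination_by ((mp + 1 - nr).toNat, 0, prods.length + 1)
end

def derivare (cfg_generare : List (String × List (List String))) (target : String) (start : String) (max_pasi : Int) : Option (List String) :=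
  pasiA (PySem.Dict.ofList cfg_generare) (pvTgt target) max_pasi [start] [start] 0

-- ===== PORT B =====
def pvFuel (mp nr : Int) : Nat := (mp + 1 - nr).toNat

def pvK (d : PySem.Dict String (List (List String))) : Nat := (d.values.map List.length).sum

def pvMu (d : PySem.Dict String (List (List String))) (mp : Int)
    (stack : List (List String × List String × Int)) : Nat :=
  (stack.map (fun f => (pvK d + 1) ^ pvFuel mp f.2.2)).sum

theorem pv_getD_len_le (d : PySem.Dict String (List (List String))) (s : String) :
    (d.getD s []).length ≤ pvK d := by
  obtain ⟨l⟩ := d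
  simp only [PySem.Dict.getD, PySem.Dict.get?, pvK, PySem.Dict.values]
  induction l with
  | nil => simp
  | cons p t ih =>
    by_cases hp : (p.1 == s)
    · simp [List.find?, hp]
    · simp only [List.find?, hp] at *
      simp only [List.map_cons, List.sum_cons]
      exact le_trans ih (Nat.le_add_left _ _)

theorem pv_mu_push (d : PySem.Dict String (List (List String))) (mp : Int)
    (cl pas : List String) (nr : Int) (rest : List (List String × List String × Int))
    (g : List String → List String × List String × Int)
    (hg : ∀ x, (g x).2.2 = nr + 1) (h : ¬ mp < nr) (prods : List (List String))
    (hlen : prods.length ≤ pvK d) :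
    pvMu d mp (prods.map g ++ rest) < pvMu d mp ((cl, pas, nr) :: rest) := by
  have hf : pvFuel mp nr = pvFuel mp (nr + 1) + 1 := by unfold pvFuel; omega
  have hc' : 0 < (pvK d + 1) ^ pvFuel mp (nr + 1) := Nat.pow_pos (Nat.succ_pos _)
  have h1 : pvMu d mp (prods.map g ++ rest)
      = prods.length * (pvK d + 1) ^ pvFuel mp (nr + 1) + pvMu d mp rest := by
    simp only [pvMu, List.map_append, List.sum_append, List.map_map]
    have h2 : (prods.map fun x => (pvK d + 1) ^ pvFuel mp ((g x).2.2))
        = prods.map fun _ => (pvK d + 1) ^ pvFuel mp (nr + 1) :=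
      List.map_congr_left (fun x _ => by rw [hg])
    simp only [Function.comp_def, h2, List.map_const', List.sum_replicate, smul_eq_mul]
  have h3 : pvMu d mp ((cl, pas, nr) :: rest)
      = (pvK d + 1) ^ pvFuel mp (nr + 1) * (pvK d + 1) + pvMu d mp rest := by
    simp only [pvMu, List.map_cons, List.sum_cons, hf, pow_succ]
  rw [h1, h3]
  have h4 : prods.length * (pvK d + 1) ^ pvFuel mp (nr + 1)
      < (pvK d + 1) ^ pvFuel mp (nr + 1) * (pvK d + 1) := by
    rw [Nat.mul_comm _ (pvK d + 1)]
    exact Nat.mul_lt_mul_of_lt_of_le (Nat.lt_succ_of_le hlen) (Nat.le_refl _) hc'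
  omega

def loopB (d : PySem.Dict String (List (List String))) (tgt : List String) (mp : Int) :
    List (List String × List String × Int) → Option (List String)
  | [] => none
  | (cl, pas, nr) :: rest =>
    if h : mp < nr then loopB d tgt mp rest
    else if cl = tgt then some pas
    else
      match pvFindNT d cl 0 with
      | none => loopB d tgt mp rest
      | some (i, s) =>
        loopB d tgt mp
          (((d.getD s []).map (fun constr =>
              let nl := cl.take i ++ constr ++ cl.drop (i + 1)
              (nl, pas ++ [PySem.Str.join "" nl], nr + 1))) ++ rest)
termination_by stack => pvMu d mp stack
decreasing_by
  · simp [pvMu]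
  · simp [pvMu]
  · exact pv_mu_push d mp cl pas nr rest _ (fun x => rfl) h _ (by
      simpa using pv_getD_len_le d s)

def derivare_alt (cfg_generare : List (String × List (List String))) (target : String) (start : String) (max_pasi : Int) : Option (List String) :=
  loopB (PySem.Dict.ofList cfg_generare) (pvTgt target) max_pasi [([start], [start], 0)]

-- ===== PRECONDITION & SPEC =====
def Spec_derivare (cfg_generare : List (String × List (List String))) (target : String) (start : String) (max_pasi : Int) (out : Option (List String)) : Prop := out = derivare_alt cfg_generare target start max_pasi
instance (cfg_generare : List (String × List (List String))) (target : String) (start : String) (max_pasi : Int) (out : Option (List String)) : Decidable (Spec_derivare cfg_generare target start max_pasi out) := by unfold Spec_derivare; infer_instance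

-- ===== CLAIM (what is proved, stated in full; the proofs are below) =====
def Claim_equal_derivare : Prop := ∀ (cfg_generare : List (String × List (List String))) (target : String) (start : String) (max_pasi : Int), Dom_derivare cfg_generare target start max_pasi → Spec_derivare cfg_generare target start max_pasi (derivare cfg_generare target start max_pasi)

-- ===== LEMMAS AND PROOFS =====

-- first-Some over the frames of a stack, each evaluated with A's recursive pasi
def firstA (d : PySem.Dict String (List (List String))) (tgt : List String) (mp : Int) :
    List (List String × List String × Int) → Option (List String)
  | [] => none
  | (cl, pas, nr) :: rest =>
    match pasiA d tgt mp cl pas nr with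
    | some r => some r
    | none => firstA d tgt mp rest

theorem pasiA_prefix (d : PySem.Dict String (List (List String))) (tgt : List String) (mp : Int) :
    ∀ cl pas nr r, pasiA d tgt mp cl pas nr = some r → pas <+: r := by
  have H := pasiA.induct d tgt mp
    (fun cl pas nr => ∀ r, pasiA d tgt mp cl pas nr = some r → pas <+: r)
    (fun prods cl pas nr i h => ∀ r, tryA d tgt mp prods cl pas nr i h = some r → pas <+: r)
  intro cl pas nr
  apply H
  · intro cl pas nr h r hr; rw [pasiA] at hr; simp [h] at hr
  · intro pas nr h r hr; rw [pasiA] at hr; simp [h] at hr; subst hr; exact List.prefix_refl _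
  · intro cl pas nr h hcl hall r hr; rw [pasiA] at hr; simp [h, hcl, hall] at hr
  · intro cl pas nr h hcl hall hf r hr; rw [pasiA] at hr; simp [h, hcl, hall, hf] at hr
  · intro cl pas nr h hcl hall i s hf ih r hr
    rw [pasiA] at hr; simp only [h, hcl, hall, hf] at hr
    exact ih r hr
  · intro cl pas nr i h r hr; rw [tryA] at hr; simp at hr
  · intro cl pas nr i h constr rest nl heq ih1 ih2 r hr
    rw [tryA.eq_def] at hr
    dsimp only at hr
    simp only [nl, dite_eq_ite] at heq
    rw [heq] at hr; simp at hr
    exact ih2 r hr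
  · intro cl pas nr i h constr rest nl r0 heq hne ih1 r hr
    rw [tryA.eq_def] at hr
    dsimp only at hr
    simp only [nl, dite_eq_ite] at heq ih1
    rw [heq] at hr; simp [hne] at hr
    subst hr
    have h1 : pas ++ [PySem.Str.join "" (if constr = [] then List.take i cl ++ List.drop (i + 1) cl
        else List.take i cl ++ constr ++ List.drop (i + 1) cl)] <+: r0 := ih1 r0 heq
    exact (List.prefix_append _ _).trans h1
  · intro cl pas nr i h constr rest nl heq ih1 ih2 r hr
    rw [tryA.eq_def] at hr
    dsimp only at hr
    simp only [nl, dite_eq_ite] at heq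
    rw [heq] at hr; simp at hr
    exact ih2 r hr

theorem findNT_some_not_all (d : PySem.Dict String (List (List String))) :
    ∀ (cl : List String) (j : Nat) (p : Nat × String), pvFindNT d cl j = some p →
      cl.all (fun s => !(d.contains s)) = false := by
  intro cl
  induction cl with
  | nil => intro j p hp; simp [pvFindNT] at hp
  | cons x t ih =>
    intro j p hp
    simp only [pvFindNT] at hp
    by_cases hx : d.contains x
    · simp [hx]
    · simp only [hx] at hp; rw [if_neg (by simp [hx])] at hp
      simp [ih _ _ hp]

theorem firstA_append (d : PySem.Dict String (List (List String))) (tgt : List String) (mp : Int)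
    (a b : List (List String × List String × Int)) :
    firstA d tgt mp (a ++ b) =
      match firstA d tgt mp a with
      | some r => some r
      | none => firstA d tgt mp b := by
  induction a with
  | nil => simp [firstA]
  | cons f t ih =>
    obtain ⟨cl, pas, nr⟩ := f
    simp only [List.cons_append, firstA, ih]
    cases pasiA d tgt mp cl pas nr <;> simp

theorem tryA_eq_firstA (d : PySem.Dict String (List (List String))) (tgt : List String) (mp : Int)
    (cl pas : List String) (nr : Int) (i : Nat) (h : nr ≤ mp) :
    ∀ prods, tryA d tgt mp prods cl pas nr i h =
      firstA d tgt mp (prods.map (fun constr =>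
        let nl := cl.take i ++ constr ++ cl.drop (i + 1)
        (nl, pas ++ [PySem.Str.join "" nl], nr + 1))) := by
  intro prods
  induction prods with
  | nil => rw [tryA]; simp [firstA]
  | cons constr rest ih =>
    rw [tryA.eq_def]
    dsimp only
    have hnl : (if constr = [] then List.take i cl ++ List.drop (i + 1) cl
        else List.take i cl ++ constr ++ List.drop (i + 1) cl)
        = List.take i cl ++ constr ++ List.drop (i + 1) cl := by
      split_ifs with hc
      · subst hc; simp
      · rfl
    rw [hnl]
    simp only [List.map_cons, firstA]
    cases hres : pasiA d tgt mp (List.take i cl ++ constr ++ List.drop (i + 1) cl)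
        (pas ++ [PySem.Str.join "" (List.take i cl ++ constr ++ List.drop (i + 1) cl)]) (nr + 1) with
    | some r =>
      have hpre := pasiA_prefix d tgt mp _ _ _ _ hres
      have hrne : r ≠ [] := by
        intro hr0; rw [hr0] at hpre
        simpa using List.prefix_nil.mp hpre
      simp [hrne]
    | none => exact ih

theorem loopB_eq_firstA (d : PySem.Dict String (List (List String))) (tgt : List String) (mp : Int) :
    ∀ stack, loopB d tgt mp stack = firstA d tgt mp stack := by
  intro stack
  induction stack using loopB.induct d tgt mp with
  | case1 => rw [loopB]; simp [firstA]
  | case2 cl pas nr rest h ih =>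
    rw [loopB]
    simp only [firstA]
    rw [pasiA]
    simp only [h, dif_pos]
    exact ih
  | case3 pas nr rest h =>
    rw [loopB]
    simp [h, firstA]
    rw [pasiA]
    simp [h]
  | case4 cl pas nr rest h hcl hf ih =>
    rw [loopB]
    simp only [dif_neg h, if_neg hcl, hf]
    rw [ih]
    simp only [firstA]
    rw [pasiA]
    simp only [dif_neg h, if_neg hcl, hf]
    cases hall : cl.all (fun s => !(d.contains s)) <;> simp
  | case5 cl pas nr rest h hcl i s hf ih =>
    have hall := findNT_some_not_all d cl 0 _ hf
    rw [loopB]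
    simp only [dif_neg h, if_neg hcl, hf]
    rw [ih, firstA_append]
    simp only [firstA]
    rw [pasiA]
    simp only [dif_neg h, if_neg hcl, hall, hf]
    rw [tryA_eq_firstA d tgt mp cl pas nr i (not_lt.mp h) (d.getD s [])]
    simp

-- ===== VERDICT (by name: the statement is the Claim_ definition above) =====
theorem derivare_spec : Claim_equal_derivare := by
  intro cfg target start mp _
  unfold Spec_derivare derivare derivare_alt
  rw [loopB_eq_firstA]
  simp only [firstA]
  cases h : pasiA (PySem.Dict.ofList cfg) (pvTgt target) mp [start] [start] 0 <;> simp
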